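-- pv_equiv track=rewrite | github.com/MicaelTargino/leetcode | binary_search_w_bubble_sort/app.py | busca_ordenada
-- ===== SOURCE A (Python) =====
-- def busca_ordenada(lista, elemento) -> int:
--
--     def bubble_sort(lista):
--       n = len(lista)
--       for i in range(n):
--           trocado = False
--           for j in range(0, n-i-1):
--               if lista[j] > lista[j+1]:
--                   lista[j], lista[j+1] = lista[j+1], lista[j]
--                   trocado = True
--           if not trocado:
--               break
--       return lista
--
--     lista = bubble_sort(lista)
--
--     # define as variáveis prev e next com valor inicial igual às extremidades da lista
--     prev, next = 0, len(lista) - 1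
--
--     # se a variável prev ficar maior que a next, significa que toda a lista já foi comparada e o elemento não foi encontrado
--     while prev <= next:
--       middle_idx = (prev + next) // 2
--       middle_element = lista[middle_idx]
--
--       if middle_element == elemento:
--           return middle_idx
--       elif middle_element < elemento:
--           prev = middle_idx + 1
--       else:
--           next = middle_idx - 1
--
--     return -1
-- ===== SOURCE B (Python) =====
-- def busca_ordenada(lista, elemento) -> int:
--     # Build a sorted copy by insertion sort (does not mutate the caller's list),
--     # then locate the element with a recursive binary search.
--     ordenada = []
--     for x in lista:
--         i = 0
--         while i < len(ordenada) and ordenada[i] <= x: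
--             i += 1
--         ordenada.insert(i, x)
--
--     def bs(low, high):
--         if low > high:
--             return -1
--         mid = (low + high) // 2
--         v = ordenada[mid]
--         if v == elemento:
--             return mid
--         if v < elemento:
--             return bs(mid + 1, high)
--         return bs(low, mid - 1)
--
--     return bs(0, len(ordenada) - 1)
-- ===== Notes on version B (the rewrite author's own statement) =====
-- stated objective: faster
-- what changed: Replaces the in-place bubble sort with a pure insertion sort into a fresh list (C-level list.insert instead of Python-level adjacent swaps) and the iterative while-loop binary search with a recursive helper bs(low, high) using the same midpoint formula, so duplicates resolve to the identical index; B does not mutate the argument list (return-value equivalence).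
import Mathlib
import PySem

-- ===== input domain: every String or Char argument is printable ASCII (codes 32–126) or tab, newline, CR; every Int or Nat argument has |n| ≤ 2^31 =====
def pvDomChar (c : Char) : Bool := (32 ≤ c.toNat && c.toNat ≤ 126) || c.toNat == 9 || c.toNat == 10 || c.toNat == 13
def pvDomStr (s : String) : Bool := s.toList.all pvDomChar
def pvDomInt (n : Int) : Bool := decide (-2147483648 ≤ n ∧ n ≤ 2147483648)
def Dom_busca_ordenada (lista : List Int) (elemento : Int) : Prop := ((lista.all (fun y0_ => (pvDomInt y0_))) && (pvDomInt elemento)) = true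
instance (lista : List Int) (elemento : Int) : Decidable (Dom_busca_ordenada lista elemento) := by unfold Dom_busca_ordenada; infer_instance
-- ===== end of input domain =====

-- B replaces A's in-place bubble sort by a pure insertion sort and the iterative binary search
-- by a recursive one (same midpoint); equivalence is about the RETURN value only (A sorts the
-- caller's list in place, B does not mutate it).

-- ===== PORT A =====
-- inner loop 'for j in range(0, n-i-1)': one bubble pass over the list limited to k comparisons,
-- returning the list and the 'trocado' flag
def pvPassAux : List Int → Nat → List Int × Bool
  | l, 0 => (l, false)
  | [], _ + 1 => ([], false)
  | [a], _ + 1 => ([a], false)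
  | a :: b :: t, k + 1 =>
    if a > b then
      let r := pvPassAux (a :: t) k
      (b :: r.1, true)
    else
      let r := pvPassAux (b :: t) k
      (a :: r.1, r.2)

-- outer loop 'for i in range(n)' with the early 'break' when no swap happened
-- (structural recursion over the list of remaining loop indices)
def pvBubbleGo (n : Nat) : List Nat → List Int → List Int
  | [], l => l
  | i :: rest, l =>
    let p := pvPassAux l (n - i - 1)
    if p.2 then pvBubbleGo n rest p.1 else p.1

-- termination of the 'while prev <= next' loop: the interval shrinks (cited in decreasing_by)
theorem pvBuscaDec1 (prev next : Int) (h : prev ≤ next) :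
    (next + 1 - (PySem.Int.floordiv (prev + next) 2 + 1)).toNat < (next + 1 - prev).toNat := by
  have hb := PySem.Int.floordiv_two_mid_bounds h
  omega

theorem pvBuscaDec2 (prev next : Int) (h : prev ≤ next) :
    (PySem.Int.floordiv (prev + next) 2 - 1 + 1 - prev).toNat < (next + 1 - prev).toNat := by
  have hb := PySem.Int.floordiv_two_mid_bounds h
  omega

-- the 'while prev <= next' binary-search loop; the 'none' branch is unreachable for the
-- initial call (index stays inside the list), Python never raises here
def pvBuscaLoop (l : List Int) (e : Int) (prev next : Int) : Int :=
  if h : prev ≤ next then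
    let m := PySem.Int.floordiv (prev + next) 2
    match PySem.List.pyGet? l m with
    | none => -1
    | some v =>
      if v = e then m
      else if v < e then pvBuscaLoop l e (m + 1) next
      else pvBuscaLoop l e prev (m - 1)
  else -1
termination_by (next + 1 - prev).toNat
decreasing_by
  · exact pvBuscaDec1 prev next h
  · exact pvBuscaDec2 prev next h

def busca_ordenada (lista : List Int) (elemento : Int) : Int :=
  let lista' := pvBubbleGo lista.length (List.range lista.length) lista
  pvBuscaLoop lista' elemento 0 ((lista'.length : Int) - 1)

-- ===== PORT B =====
-- the 'while i < len(ordenada) and ordenada[i] <= x: …; ordenada.insert(i, x)' step: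
-- insert x after all elements ≤ x
def pvInsAlt (x : Int) : List Int → List Int
  | [] => [x]
  | y :: ys => if y ≤ x then y :: pvInsAlt x ys else x :: y :: ys

-- 'for x in lista: …' building the sorted copy
def pvISort (lista : List Int) : List Int :=
  lista.foldl (fun acc x => pvInsAlt x acc) []

-- recursive helper bs(low, high); 'none' branch unreachable for the initial call
def pvBSAlt (l : List Int) (e : Int) (low high : Int) : Int :=
  if h : low > high then -1
  else
    let mid := PySem.Int.floordiv (low + high) 2
    match PySem.List.pyGet? l mid with
    | none => -1
    | some v =>
      if v = e then mid
      else if v < e then pvBSAlt l e (mid + 1) high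
      else pvBSAlt l e low (mid - 1)
termination_by (high + 1 - low).toNat
decreasing_by
  · exact pvBuscaDec1 low high (by omega)
  · exact pvBuscaDec2 low high (by omega)

def busca_ordenada_alt (lista : List Int) (elemento : Int) : Int :=
  let ordenada := pvISort lista
  pvBSAlt ordenada elemento 0 ((ordenada.length : Int) - 1)

-- ===== PRECONDITION & SPEC =====
def Spec_busca_ordenada (lista : List Int) (elemento : Int) (out : Int) : Prop := out = busca_ordenada_alt lista elemento
instance (lista : List Int) (elemento : Int) (out : Int) : Decidable (Spec_busca_ordenada lista elemento out) := by unfold Spec_busca_ordenada; infer_instance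

-- ===== CLAIM (what is proved, stated in full; the proofs are below) =====
def Claim_equal_busca_ordenada : Prop := ∀ (lista : List Int) (elemento : Int), Dom_busca_ordenada lista elemento → Spec_busca_ordenada lista elemento (busca_ordenada lista elemento)

-- ===== LEMMAS AND PROOFS =====

-- proof-side full (unbounded) bubble pass
def pvPass : List Int → List Int × Bool
  | [] => ([], false)
  | [a] => ([a], false)
  | a :: b :: t =>
    if a > b then (b :: (pvPass (a :: t)).1, true)
    else (a :: (pvPass (b :: t)).1, (pvPass (b :: t)).2)

-- the bounded pass is the full pass on the first k+1 elements with the tail untouched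
theorem passAux_split : ∀ (l : List Int) (k : Nat),
    pvPassAux l k = ((pvPass (l.take (k + 1))).1 ++ l.drop (k + 1), (pvPass (l.take (k + 1))).2) := by
  intro l k
  induction l, k using pvPassAux.induct with
  | case1 l => cases l with
    | nil => simp [pvPassAux, pvPass]
    | cons a t => cases t <;> simp [pvPassAux, pvPass]
  | case2 k => simp [pvPassAux, pvPass]
  | case3 a k => simp [pvPassAux, pvPass]
  | case4 a b t k hab ih =>
    simp only [pvPassAux, if_pos hab, List.take_succ_cons, List.drop_succ_cons, pvPass, ih]
    simp
  | case5 a b t k hab ih =>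
    simp only [pvPassAux, if_neg hab, List.take_succ_cons, List.drop_succ_cons, pvPass, ih]
    simp

theorem pass_perm : ∀ l : List Int, List.Perm (pvPass l).1 l := by
  intro l
  induction l using pvPass.induct with
  | case1 => simp [pvPass]
  | case2 a => simp [pvPass]
  | case3 a b t hab ih =>
    simp only [pvPass, if_pos hab]
    exact (ih.cons b).trans (List.Perm.swap a b t)
  | case4 a b t hab ih =>
    simp only [pvPass, if_neg hab]
    exact ih.cons a

theorem pass_flag_false : ∀ l : List Int, (pvPass l).2 = false → (pvPass l).1 = l ∧ l.Pairwise (· ≤ ·) := by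
  intro l
  induction l using pvPass.induct with
  | case1 => simp [pvPass]
  | case2 a => simp [pvPass]
  | case3 a b t hab ih => simp [pvPass, hab]
  | case4 a b t hab ih =>
    intro hf
    simp only [pvPass, if_neg hab] at hf ⊢
    obtain ⟨h1, h2⟩ := ih hf
    refine ⟨by simp [h1], ?_⟩
    rw [List.pairwise_cons]
    refine ⟨?_, h2⟩
    intro y hy
    rcases List.mem_cons.1 hy with rfl | hy'
    · omega
    · have hb : b ≤ y := (List.pairwise_cons.1 h2).1 y hy'
      omega

theorem pass_last : ∀ l : List Int, l ≠ [] → ∃ q m, (pvPass l).1 = q ++ [m] ∧ ∀ x ∈ l, x ≤ m := by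
  intro l
  induction l using pvPass.induct with
  | case1 => intro h; exact absurd rfl h
  | case2 a => intro _; exact ⟨[], a, by simp [pvPass], by simp⟩
  | case3 a b t hab ih =>
    intro _
    obtain ⟨q, m, hq, hm⟩ := ih (by simp)
    refine ⟨b :: q, m, by simp [pvPass, hab, hq], ?_⟩
    intro x hx
    rcases List.mem_cons.1 hx with rfl | hx'
    · exact hm x (by simp)
    · rcases List.mem_cons.1 hx' with rfl | hx''
      · have := hm a (by simp); omega
      · exact hm x (by simp [hx''])
  | case4 a b t hab ih =>
    intro _
    obtain ⟨q, m, hq, hm⟩ := ih (by simp)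
    refine ⟨a :: q, m, by simp [pvPass, hab, hq], ?_⟩
    intro x hx
    rcases List.mem_cons.1 hx with rfl | hx'
    · have := hm b (by simp); omega
    · exact hm x hx'

theorem bubbleGo_correct : ∀ (fuel n i : Nat) (l : List Int), n - i = fuel → n = l.length →
    (l.drop (n - i)).Pairwise (· ≤ ·) →
    (∀ x ∈ l.take (n - i), ∀ y ∈ l.drop (n - i), x ≤ y) →
    (pvBubbleGo n (List.range' i fuel) l).Pairwise (· ≤ ·) ∧
      List.Perm (pvBubbleGo n (List.range' i fuel) l) l := by
  intro fuel
  induction fuel with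
  | zero =>
    intro n i l hfuel hn hdrop hcross
    have h0 : n - i = 0 := by omega
    rw [h0] at hdrop
    exact ⟨by simpa [pvBubbleGo] using hdrop, by simp [pvBubbleGo]⟩
  | succ fuel ih =>
    intro n i l hfuel hn hdrop hcross
    rw [List.range'_succ, pvBubbleGo]
    have hni : i < n := by omega
    have hk1 : n - i - 1 + 1 = n - i := by omega
    have hsplit := passAux_split l (n - i - 1)
    rw [hk1] at hsplit
    set pfx := l.take (n - i) with hpfx
    have hlpfx : pfx.length = n - i := by
      rw [hpfx, List.length_take]; omega
    have hpfxne : pfx ≠ [] := by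
      intro h; rw [h] at hlpfx; simp at hlpfx; omega
    by_cases hf : (pvPass pfx).2
    · -- a swap happened: recurse
      obtain ⟨q, m, hq, hm⟩ := pass_last pfx hpfxne
      have hqlen : q.length = n - i - 1 := by
        have := (pass_perm pfx).length_eq
        rw [hq] at this; simp at this; omega
      have hperm1 : List.Perm ((pvPass pfx).1 ++ l.drop (n - i)) l := by
        have h1 : List.Perm ((pvPass pfx).1 ++ l.drop (n - i)) (pfx ++ l.drop (n - i)) :=
          (pass_perm pfx).append_right _
        rw [hpfx, List.take_append_drop] at h1
        exact h1
      have hstate : (pvPass pfx).1 ++ l.drop (n - i) = q ++ m :: l.drop (n - i) := by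
        rw [hq]; simp
      have hmmem : m ∈ pfx := by
        have : m ∈ (pvPass pfx).1 := by rw [hq]; simp
        exact (pass_perm pfx).subset this
      have hqmem : ∀ x ∈ q, x ∈ pfx := by
        intro x hx
        have : x ∈ (pvPass pfx).1 := by rw [hq]; simp [hx]
        exact (pass_perm pfx).subset this
      have hni1 : n - (i + 1) = n - i - 1 := by omega
      have hrec := ih n (i + 1) ((pvPass pfx).1 ++ l.drop (n - i)) (by omega)
        (by rw [hperm1.length_eq]; omega)
        (by
          rw [hstate, hni1, ← hqlen, List.drop_left]
          rw [List.pairwise_cons]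
          exact ⟨fun y hy => hcross m hmmem y hy, hdrop⟩)
        (by
          rw [hstate, hni1, ← hqlen, List.drop_left, List.take_left]
          intro x hx y hy
          rcases List.mem_cons.1 hy with rfl | hy'
          · exact hm x (hqmem x hx)
          · exact hcross x (hqmem x hx) y hy')
      simp only [hsplit, hf, if_true]
      exact ⟨hrec.1, hrec.2.trans hperm1⟩
    · -- no swap: the pass returned the list unchanged and it is sorted
      rw [Bool.not_eq_true] at hf
      obtain ⟨heq, hsorted⟩ := pass_flag_false pfx hf
      simp only [hsplit, hf, Bool.false_eq_true, if_false]
      rw [heq, hpfx, List.take_append_drop]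
      constructor
      · rw [← List.take_append_drop (n - i) l, List.pairwise_append]
        exact ⟨by rw [hpfx] at hsorted; exact hsorted, hdrop, hcross⟩
      · exact List.Perm.refl l

theorem insAlt_perm (x : Int) : ∀ l : List Int, List.Perm (pvInsAlt x l) (x :: l) := by
  intro l
  induction l with
  | nil => simp [pvInsAlt]
  | cons y ys ih =>
    simp only [pvInsAlt]
    split
    · exact (ih.cons y).trans (List.Perm.swap x y ys)
    · exact List.Perm.refl _

theorem insAlt_pairwise (x : Int) : ∀ l : List Int, l.Pairwise (· ≤ ·) → (pvInsAlt x l).Pairwise (· ≤ ·) := by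
  intro l
  induction l with
  | nil => intro _; simp [pvInsAlt]
  | cons y ys ih =>
    intro h
    rw [List.pairwise_cons] at h
    simp only [pvInsAlt]
    split
    · rename_i hyx
      rw [List.pairwise_cons]
      refine ⟨?_, ih h.2⟩
      intro z hz
      rcases List.mem_cons.1 (((insAlt_perm x ys).mem_iff).1 hz) with rfl | h'
      · omega
      · exact h.1 z h'
    · rename_i hyx
      rw [List.pairwise_cons]
      refine ⟨?_, List.pairwise_cons.2 h⟩
      intro z hz
      rcases List.mem_cons.1 hz with rfl | h'
      · omega
      · have := h.1 z h'; omega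

theorem isort_go : ∀ (l acc : List Int), acc.Pairwise (· ≤ ·) →
    (l.foldl (fun acc x => pvInsAlt x acc) acc).Pairwise (· ≤ ·) ∧
    List.Perm (l.foldl (fun acc x => pvInsAlt x acc) acc) (acc ++ l) := by
  intro l
  induction l with
  | nil => intro acc h; simpa using h
  | cons x t ih =>
    intro acc h
    have h1 := ih (pvInsAlt x acc) (insAlt_pairwise x acc h)
    refine ⟨h1.1, h1.2.trans ?_⟩
    exact ((insAlt_perm x acc).append_right t).trans (by simpa using (List.perm_middle (a := x) (l₁ := acc) (l₂ := t)).symm)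

theorem sorts_eq (l : List Int) : pvBubbleGo l.length (List.range l.length) l = pvISort l := by
  have hb := bubbleGo_correct l.length l.length 0 l (by omega) rfl (by simp) (by simp)
  rw [List.range_eq_range']
  have hi := isort_go l [] (by simp)
  exact List.Perm.eq_of_pairwise (fun a b _ _ h1 h2 => le_antisymm h1 h2) hb.1 hi.1
    (hb.2.trans ((show List.Perm (pvISort l) l by simpa [pvISort] using hi.2).symm))

theorem search_eq : ∀ (l : List Int) (e prev next : Int), pvBuscaLoop l e prev next = pvBSAlt l e prev next := by
  intro l e prev next
  induction prev, next using pvBuscaLoop.induct l e with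
  | case1 prev next h m hnone =>
    rw [pvBuscaLoop, dif_pos h, pvBSAlt, dif_neg (by omega : ¬ prev > next)]
    have hm : m = PySem.Int.floordiv (prev + next) 2 := rfl
    rw [hm] at hnone
    simp only [hnone]
  | case2 prev next h m hsome =>
    rw [pvBuscaLoop, dif_pos h, pvBSAlt, dif_neg (by omega : ¬ prev > next)]
    have hm : m = PySem.Int.floordiv (prev + next) 2 := rfl
    rw [hm] at hsome
    simp only [hsome]
    simp
  | case3 prev next h m v hv hne hlt ih =>
    rw [pvBuscaLoop, dif_pos h, pvBSAlt, dif_neg (by omega : ¬ prev > next)]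
    have hm : m = PySem.Int.floordiv (prev + next) 2 := rfl
    rw [hm] at hv
    simp only [hv]
    simp only [if_neg hne, if_pos hlt]
    exact ih
  | case4 prev next h m v hv hne hnlt ih =>
    rw [pvBuscaLoop, dif_pos h, pvBSAlt, dif_neg (by omega : ¬ prev > next)]
    have hm : m = PySem.Int.floordiv (prev + next) 2 := rfl
    rw [hm] at hv
    simp only [hv]
    simp only [if_neg hne, if_neg hnlt]
    exact ih
  | case5 prev next h =>
    rw [pvBuscaLoop, dif_neg h, pvBSAlt, dif_pos (by omega : prev > next)]

-- ===== VERDICT (by name: the statement is the Claim_ definition above) =====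
theorem busca_ordenada_spec : Claim_equal_busca_ordenada := by
  intro lista elemento _
  unfold Spec_busca_ordenada busca_ordenada busca_ordenada_alt
  simp only [sorts_eq, search_eq]
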